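-- pv_equiv track=rewrite | github.com/mortyc126-debug/SHA-256 | exp107_circular_carry.py | carry_bits_circular
-- ===== SOURCE A (Python) =====
-- def carry_bits_circular(a, b, max_iter=64):
--     """Circular carry: bit 31 feeds back to bit 0.
--     Iterate until convergence."""
--     # Start with c_in = 0
--     carries = [0] * 32
--     for iteration in range(max_iter):
--         new_carries = [0] * 32
--         c_in = carries[31]  # Circular: carry from bit 31 feeds bit 0
--         c = c_in
--         for i in range(32):
--             ai = (a >> i) & 1; bi = (b >> i) & 1
--             c = (ai & bi) | ((ai ^ bi) & c)
--             new_carries[i] = c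
--         if new_carries == carries:
--             return carries, iteration + 1
--         carries = new_carries
--     return carries, max_iter  # Didn't converge
-- ===== SOURCE B (Python) =====
-- def carry_bits_circular(a, b, max_iter=64):
--     """Circular carry via arithmetic: each carry-out bit is extracted in
--     closed form from a masked addition instead of rippling bit by bit."""
--     am = a % 4294967296
--     bm = b % 4294967296
--     carries = [0] * 32
--     for iteration in range(max_iter):
--         c_in = carries[31]
--         new_carries = [(am % (1 << (i + 1)) + bm % (1 << (i + 1)) + c_in) >> (i + 1)
--                        for i in range(32)]
--         if new_carries == carries:
--             return carries, iteration + 1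
--         carries = new_carries
--     return carries, max_iter
-- ===== Notes on version B (the rewrite author's own statement) =====
-- stated objective: alternative
-- what changed: The 32-step bit-by-bit ripple-carry inner loop (maintaining a running carry through AND/XOR/OR bit logic) is replaced by a closed-form arithmetic extraction: each carry-out bit i is computed directly as (a%2^(i+1) + b%2^(i+1) + c_in) >> (i+1) from a single masked addition per bit, with no carry recurrence; the outer fixed-point loop is unchanged.
import Mathlib
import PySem

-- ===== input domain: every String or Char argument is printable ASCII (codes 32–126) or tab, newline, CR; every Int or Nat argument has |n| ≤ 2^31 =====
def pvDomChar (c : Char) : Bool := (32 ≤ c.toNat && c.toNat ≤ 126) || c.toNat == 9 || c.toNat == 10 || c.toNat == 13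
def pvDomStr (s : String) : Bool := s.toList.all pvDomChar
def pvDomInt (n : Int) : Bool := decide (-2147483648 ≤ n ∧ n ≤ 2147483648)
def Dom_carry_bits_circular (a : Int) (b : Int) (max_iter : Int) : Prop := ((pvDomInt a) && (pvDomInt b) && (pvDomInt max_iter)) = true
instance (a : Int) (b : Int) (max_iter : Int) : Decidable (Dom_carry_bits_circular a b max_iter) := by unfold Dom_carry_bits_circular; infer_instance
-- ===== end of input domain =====

-- B replaces A's bit-by-bit ripple inner loop by a closed-form arithmetic carry
-- extraction from masked additions (alternative decomposition, same outer fixed-point loop).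


-- ===== PORT A =====
-- inner ripple loop: for i in range(32): c = (ai & bi) | ((ai ^ bi) & c); new_carries[i] = c
def pvStepA (a : Int) (b : Int) (c_in : Int) : List Int :=
  ((List.range 32).foldl (fun (st : Int × List Int) (i : Nat) =>
      let ai := PySem.Int.band (a >>> i) 1
      let bi := PySem.Int.band (b >>> i) 1
      let c := PySem.Int.bor (PySem.Int.band ai bi)
                 (PySem.Int.band (PySem.Int.bxor ai bi) st.1)
      (c, st.2.set i c))
    (c_in, List.replicate 32 0)).2

-- outer loop: for iteration in range(max_iter), with convergence test
def pvLoopA (a : Int) (b : Int) (max_iter : Int) (carries : List Int) (iter : Int) :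
    Nat → List Int × Int
  | 0 => (carries, max_iter)
  | fuel+1 =>
    let new_carries := pvStepA a b (PySem.List.pyGetD carries 31 0)
    if new_carries = carries then (carries, iter + 1)
    else pvLoopA a b max_iter new_carries (iter + 1) fuel

def carry_bits_circular (a : Int) (b : Int) (max_iter : Int) : List Int × Int :=
  pvLoopA a b max_iter (List.replicate 32 0) 0 max_iter.toNat

-- ===== PORT B =====
-- closed-form carry extraction: new_carries[i] = (am % 2^(i+1) + bm % 2^(i+1) + c_in) >> (i+1)
def pvStepB (am : Int) (bm : Int) (c_in : Int) : List Int :=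
  (List.range 32).map (fun (i : Nat) =>
    (PySem.Int.mod am ((1 <<< (i+1) : Nat) : Int)
      + PySem.Int.mod bm ((1 <<< (i+1) : Nat) : Int) + c_in) >>> (i+1))

def pvLoopB (am : Int) (bm : Int) (max_iter : Int) (carries : List Int) (iter : Int) :
    Nat → List Int × Int
  | 0 => (carries, max_iter)
  | fuel+1 =>
    let new_carries := pvStepB am bm (PySem.List.pyGetD carries 31 0)
    if new_carries = carries then (carries, iter + 1)
    else pvLoopB am bm max_iter new_carries (iter + 1) fuel

def carry_bits_circular_alt (a : Int) (b : Int) (max_iter : Int) : List Int × Int :=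
  pvLoopB (PySem.Int.mod a 4294967296) (PySem.Int.mod b 4294967296) max_iter
    (List.replicate 32 0) 0 max_iter.toNat

-- ===== PRECONDITION & SPEC =====
def Spec_carry_bits_circular (a : Int) (b : Int) (max_iter : Int) (out : List Int × Int) : Prop := out = carry_bits_circular_alt a b max_iter
instance (a : Int) (b : Int) (max_iter : Int) (out : List Int × Int) : Decidable (Spec_carry_bits_circular a b max_iter out) := by unfold Spec_carry_bits_circular; infer_instance

-- ===== CLAIM (what is proved, stated in full; the proofs are below) =====
def Claim_equal_carry_bits_circular : Prop := ∀ (a : Int) (b : Int) (max_iter : Int), Dom_carry_bits_circular a b max_iter → Spec_carry_bits_circular a b max_iter (carry_bits_circular a b max_iter)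

-- ===== LEMMAS AND PROOFS =====

-- closed form of the carry into bit k when adding x, y with carry-in c
def pvCarryN (x y c k : Nat) : Nat := (x % 2^k + y % 2^k + c) / 2^k

theorem pvCarryN_le_one (x y c k : Nat) (hc : c ≤ 1) : pvCarryN x y c k ≤ 1 := by
  unfold pvCarryN
  have hq : 0 < 2^k := Nat.two_pow_pos k
  have h1 : x % 2^k < 2^k := Nat.mod_lt _ hq
  have h2 : y % 2^k < 2^k := Nat.mod_lt _ hq
  have := (Nat.div_lt_iff_lt_mul hq).mpr (by omega : x % 2^k + y % 2^k + c < 2 * 2^k)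
  omega

theorem pvCarryN_succ (x y c k : Nat) (hc : c ≤ 1) :
    pvCarryN x y c (k+1) = (x / 2^k % 2 + y / 2^k % 2 + pvCarryN x y c k) / 2 := by
  unfold pvCarryN
  have hq : 0 < 2^k := Nat.two_pow_pos k
  rw [pow_succ]
  rw [Nat.mod_mul (x := x), Nat.mod_mul (x := y)]
  set q := 2^k with hqdef
  set xk := x / q % 2 with hxk
  set yk := y / q % 2 with hyk
  have hxk1 : xk ≤ 1 := by omega
  have hyk1 : yk ≤ 1 := by omega
  set S := x % q + y % q + c with hS
  have hck : S / q ≤ 1 := by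
    have h1 : x % q < q := Nat.mod_lt _ hq
    have h2 : y % q < q := Nat.mod_lt _ hq
    have := (Nat.div_lt_iff_lt_mul hq).mpr (by omega : S < 2 * q)
    omega
  have hdecomp : S = q * (S / q) + S % q := (Nat.div_add_mod S q).symm
  set ck := S / q with hckdef
  set r := S % q with hr
  have hrlt : r < q := Nat.mod_lt _ hq
  have hnum : x % q + q * xk + (y % q + q * yk) + c = r + q * (xk + yk + ck) := by
    rw [Nat.mul_add, Nat.mul_add]; omega
  rw [hnum]
  have key : ∀ T, T ≤ 3 → (r + q * T) / (q * 2) = T / 2 := by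
    intro T hT
    interval_cases T
    · rw [Nat.div_eq_of_lt (by omega)]
    · rw [Nat.div_eq_of_lt (by omega)]
    · have h2q : r + q * 2 = r + 1 * (q * 2) := by ring
      rw [h2q, Nat.add_mul_div_right _ _ (by omega : 0 < q * 2),
        Nat.div_eq_of_lt (by omega)]
    · have h3q : r + q * 3 = (r + q) + 1 * (q * 2) := by ring
      rw [h3q, Nat.add_mul_div_right _ _ (by omega : 0 < q * 2),
        Nat.div_eq_of_lt (by omega)]
  rw [key _ (by omega)]

-- majority on 0/1 bits written with Python's bitwise ops equals (x+y+z)/2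
theorem pvMaj (x y z : Nat) (hx : x ≤ 1) (hy : y ≤ 1) (hz : z ≤ 1) :
    PySem.Int.bor (PySem.Int.band ↑x ↑y)
      (PySem.Int.band (PySem.Int.bxor ↑x ↑y) ↑z) = (((x + y + z) / 2 : Nat) : Int) := by
  interval_cases x <;> interval_cases y <;> interval_cases z <;> decide

-- A's bit extraction only sees a modulo 2^32
theorem pvBit_bridge (a : Int) (n : Nat) (hn : n < 32) :
    PySem.Int.band (a >>> n) 1 = (((PySem.Int.mod a 4294967296).toNat / 2^n % 2 : Nat) : Int) := by
  rw [PySem.Int.band_one, PySem.Int.mod_eq_emod_of_pos (by norm_num : (0:Int) < 2),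
      PySem.Int.mod_eq_emod_of_pos (by norm_num : (0:Int) < 4294967296)]
  rw [Int.shiftRight_eq_div_pow]
  have hM : (4294967296 : Int) = (2^n : Nat) * ((2^(32-n) : Nat) : Int) := by
    push_cast
    rw [← pow_add]
    have h32 : n + (32 - n) = 32 := by omega
    rw [h32]
    norm_num
  have hdecomp : a = a % 4294967296 + ((2^(32-n) : Nat) : Int) * (a / 4294967296) * (2^n : Nat) := by
    have := Int.mul_ediv_add_emod a 4294967296
    rw [hM] at this ⊢
    ring_nf
    ring_nf at this
    omega
  have hnn : (0:Int) ≤ a % 4294967296 := Int.emod_nonneg a (by norm_num)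
  conv_lhs => rw [hdecomp]
  rw [Int.add_mul_ediv_right _ _ (by positivity : ((2^n : Nat) : Int) ≠ 0)]
  have h2 : ((2^(32-n) : Nat) : Int) * (a / 4294967296) = 2 * (a / 4294967296 * (2^(31-n):Nat)) := by
    push_cast
    have h31 : (2:Int)^(32-n) = 2^(31-n) * 2 := by
      rw [← pow_succ]
      have h1 : 31 - n + 1 = 32 - n := by omega
      rw [h1]
    rw [h31]; ring
  rw [h2, Int.add_mul_emod_self_left]
  rw [← Int.toNat_of_nonneg hnn]
  push_cast
  rfl

-- B's entry i is the closed-form carry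
theorem pvStepB_entry (X Y C : Nat) (i : Nat) :
    (PySem.Int.mod ↑X ((1 <<< (i+1) : Nat) : Int)
      + PySem.Int.mod ↑Y ((1 <<< (i+1) : Nat) : Int) + ↑C) >>> (i+1)
      = ((pvCarryN X Y C (i+1) : Nat) : Int) := by
  rw [Nat.one_shiftLeft]
  rw [PySem.Int.mod_natCast, PySem.Int.mod_natCast]
  rw [Int.shiftRight_eq_div_pow]
  unfold pvCarryN
  push_cast
  rfl

theorem pvStepB_eq_map (X Y C : Nat) :
    pvStepB ↑X ↑Y ↑C = (List.range 32).map (fun i => ((pvCarryN X Y C (i+1) : Nat) : Int)) := by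
  unfold pvStepB
  exact List.map_congr_left (fun i _ => pvStepB_entry X Y C i)

-- invariant of A's inner fold: after i steps, the running carry is pvCarryN … i
-- and positions below i hold the carry-out bits
theorem pvFoldA (a b : Int) (C : Nat) (hC : C ≤ 1) (n : Nat) (hn : n ≤ 32) :
    (List.range n).foldl (fun (st : Int × List Int) (i : Nat) =>
        let ai := PySem.Int.band (a >>> i) 1
        let bi := PySem.Int.band (b >>> i) 1
        let c := PySem.Int.bor (PySem.Int.band ai bi)
                   (PySem.Int.band (PySem.Int.bxor ai bi) st.1)
        (c, st.2.set i c))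
      (↑C, List.replicate 32 (0:Int))
    = (↑(pvCarryN (PySem.Int.mod a 4294967296).toNat (PySem.Int.mod b 4294967296).toNat C n),
       ((List.range n).map fun i =>
          ((pvCarryN (PySem.Int.mod a 4294967296).toNat (PySem.Int.mod b 4294967296).toNat C (i+1) : Nat) : Int))
         ++ List.replicate (32-n) (0:Int)) := by
  set X := (PySem.Int.mod a 4294967296).toNat with hX
  set Y := (PySem.Int.mod b 4294967296).toNat with hY
  induction n with
  | zero => simp [pvCarryN]
  | succ n ih =>
    rw [List.range_succ, List.foldl_append, ih (by omega)]
    simp only [List.foldl_cons, List.foldl_nil]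
    rw [pvBit_bridge a n (by omega), pvBit_bridge b n (by omega), ← hX, ← hY]
    rw [pvMaj _ _ _ (by omega) (by omega) (pvCarryN_le_one X Y C n hC)]
    rw [← pvCarryN_succ X Y C n hC]
    refine congrArg₂ Prod.mk rfl ?_
    rw [List.map_append, List.set_append_right _ _ (by simp)]
    simp only [List.length_map, List.length_range, Nat.sub_self]
    have h1 : 32 - n = (32 - (n+1)) + 1 := by omega
    rw [h1, List.replicate_succ, List.set_cons_zero]
    simp

theorem pvStepA_eq_map (a b : Int) (C : Nat) (hC : C ≤ 1) :
    pvStepA a b ↑C = (List.range 32).map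
      (fun i => ((pvCarryN (PySem.Int.mod a 4294967296).toNat
                           (PySem.Int.mod b 4294967296).toNat C (i+1) : Nat) : Int)) := by
  unfold pvStepA
  rw [pvFoldA a b C hC 32 le_rfl]
  simp

theorem pvStep_eq (a b : Int) (C : Nat) (hC : C ≤ 1) :
    pvStepA a b ↑C = pvStepB (PySem.Int.mod a 4294967296) (PySem.Int.mod b 4294967296) ↑C := by
  have hannn : (0:Int) ≤ PySem.Int.mod a 4294967296 :=
    PySem.Int.mod_nonneg _ (by norm_num : (0:Int) < 4294967296)
  have hbnnn : (0:Int) ≤ PySem.Int.mod b 4294967296 :=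
    PySem.Int.mod_nonneg _ (by norm_num : (0:Int) < 4294967296)
  rw [pvStepA_eq_map a b C hC]
  conv_rhs => rw [← Int.toNat_of_nonneg hannn, ← Int.toNat_of_nonneg hbnnn]
  rw [pvStepB_eq_map]

-- the carry fed back from bit 31 is always 0 or 1
theorem pvStep_inv (am bm c : Int) (X Y C : Nat) (hX : am = ↑X) (hY : bm = ↑Y)
    (hc : c = ↑C) (hC : C ≤ 1) :
    PySem.List.pyGetD (pvStepB am bm c) 31 0 = 0 ∨
    PySem.List.pyGetD (pvStepB am bm c) 31 0 = 1 := by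
  subst hX hY hc
  rw [pvStepB_eq_map]
  have h32 : pvCarryN X Y C 32 ≤ 1 := pvCarryN_le_one X Y C 32 hC
  have : PySem.List.pyGetD ((List.range 32).map
      (fun i => ((pvCarryN X Y C (i+1) : Nat) : Int))) 31 0 = ↑(pvCarryN X Y C 32) := by
    simp [PySem.List.pyGetD]
  rw [this]
  omega

theorem pvLoop_eq (a b max_iter : Int) (fuel : Nat) :
    ∀ (carries : List Int) (iter : Int),
      (PySem.List.pyGetD carries 31 0 = 0 ∨ PySem.List.pyGetD carries 31 0 = 1) →
      pvLoopA a b max_iter carries iter fuel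
        = pvLoopB (PySem.Int.mod a 4294967296) (PySem.Int.mod b 4294967296) max_iter carries iter fuel := by
  induction fuel with
  | zero => intro carries iter _; rfl
  | succ fuel ih =>
    intro carries iter hinv
    have hC : ∃ C : Nat, C ≤ 1 ∧ PySem.List.pyGetD carries 31 0 = ↑C := by
      rcases hinv with h | h
      · exact ⟨0, by omega, by rw [h]; rfl⟩
      · exact ⟨1, by omega, by rw [h]; rfl⟩
    obtain ⟨C, hC1, hCeq⟩ := hC
    have hstep : pvStepA a b (PySem.List.pyGetD carries 31 0)
        = pvStepB (PySem.Int.mod a 4294967296) (PySem.Int.mod b 4294967296)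
            (PySem.List.pyGetD carries 31 0) := by
      rw [hCeq]; exact pvStep_eq a b C hC1
    simp only [pvLoopA, pvLoopB, hstep]
    split_ifs with h
    · rfl
    · refine ih _ _ ?_
      refine pvStep_inv _ _ _ (PySem.Int.mod a 4294967296).toNat
        (PySem.Int.mod b 4294967296).toNat C ?_ ?_ hCeq hC1
      · exact (Int.toNat_of_nonneg (PySem.Int.mod_nonneg _ (by norm_num))).symm
      · exact (Int.toNat_of_nonneg (PySem.Int.mod_nonneg _ (by norm_num))).symm

-- ===== VERDICT (by name: the statement is the Claim_ definition above) =====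
theorem carry_bits_circular_spec : Claim_equal_carry_bits_circular := by
  intro a b max_iter _
  unfold Spec_carry_bits_circular carry_bits_circular carry_bits_circular_alt
  exact pvLoop_eq a b max_iter max_iter.toNat (List.replicate 32 0) 0 (Or.inl (by decide))
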